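-- pv_equiv track=rewrite | github.com/Dreamcraft-F/PathPilot | src/utils/path_utils.py | is_valid_path
-- ===== SOURCE A (Python) =====
-- def is_valid_path(path: str) -> bool:
--     """
--     验证路径是否有效
--
--     Args:
--         path: 路径
--
--     Returns:
--         如果路径有效返回True
--     """
--     try:
--         # 检查路径是否包含非法字符
--         illegal_chars = '<>"|?*'
--         for char in illegal_chars:
--             if char in path:
--                 return False
--
--         # 检查路径长度
--         if len(path) > 260:  # Windows最大路径长度
--             return False
--
--         return True
--     except Exception:
--         return False
-- ===== SOURCE B (Python) =====
-- def is_valid_path(path: str) -> bool: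
--     """Single pass over path: each character tested against an illegal-char set."""
--     try:
--         illegal = set('<>"|?*')
--         return len(path) <= 260 and not any(c in illegal for c in path)
--     except Exception:
--         return False
-- ===== Notes on version B (the rewrite author's own statement) =====
-- stated objective: simpler
-- what changed: Replaced six separate substring searches over path (one per illegal character) with a single pass over path's characters testing membership in an illegal-character set, combined with the length check in one boolean expression.
import Mathlib
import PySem

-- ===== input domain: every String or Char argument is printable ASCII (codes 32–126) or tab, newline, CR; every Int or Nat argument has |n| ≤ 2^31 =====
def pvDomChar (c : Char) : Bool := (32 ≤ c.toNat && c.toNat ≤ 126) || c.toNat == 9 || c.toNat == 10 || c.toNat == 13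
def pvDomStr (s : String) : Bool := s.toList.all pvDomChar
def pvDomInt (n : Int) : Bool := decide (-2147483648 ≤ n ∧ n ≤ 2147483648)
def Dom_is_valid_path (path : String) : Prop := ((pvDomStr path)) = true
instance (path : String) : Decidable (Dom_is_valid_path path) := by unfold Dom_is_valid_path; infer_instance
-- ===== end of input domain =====

-- B replaces six substring searches with one pass over the characters (objective: simpler).
-- ===== PORT A =====
-- A: for each of the six illegal characters in order, return false if it occurs in path;
-- then false if len(path) > 260; else true.
def is_valid_path (path : String) : Bool :=
  if path.toList.contains '<' then false
  else if path.toList.contains '>' then false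
  else if path.toList.contains '"' then false
  else if path.toList.contains '|' then false
  else if path.toList.contains '?' then false
  else if path.toList.contains '*' then false
  else if path.toList.length > 260 then false
  else true

-- ===== PORT B =====
-- B: one pass over path's characters, each tested against the illegal set, plus the length check.
def pvIllegal : List Char := ['<', '>', '"', '|', '?', '*']
def is_valid_path_alt (path : String) : Bool :=
  decide (path.toList.length ≤ 260) && !(path.toList.any (fun c => pvIllegal.contains c))

-- ===== PRECONDITION & SPEC =====
def Spec_is_valid_path (path : String) (out : Bool) : Prop := out = is_valid_path_alt path
instance (path : String) (out : Bool) : Decidable (Spec_is_valid_path path out) := by unfold Spec_is_valid_path; infer_instance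

-- ===== CLAIM (what is proved, stated in full; the proofs are below) =====
def Claim_equal_is_valid_path : Prop := ∀ (path : String), Dom_is_valid_path path → Spec_is_valid_path path (is_valid_path path)

-- ===== LEMMAS AND PROOFS =====

-- ===== VERDICT (by name: the statement is the Claim_ definition above) =====
theorem any_illegal_eq (l : List Char) :
    l.any (fun c => pvIllegal.contains c) =
      (l.contains '<' || l.contains '>' || l.contains '"' || l.contains '|' || l.contains '?' || l.contains '*') := by
  rw [Bool.eq_iff_iff]
  simp only [List.any_eq_true, List.contains_eq_mem, Bool.or_eq_true, decide_eq_true_eq,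
    pvIllegal, List.mem_cons, List.not_mem_nil, or_false]
  constructor
  · rintro ⟨c, hc, h⟩
    rcases h with h | h | h | h | h | h <;> subst h <;> tauto
  · intro h
    rcases h with ((((h | h) | h) | h) | h) | h <;> exact ⟨_, h, by tauto⟩

theorem is_valid_path_spec : Claim_equal_is_valid_path := by
  intro path _
  unfold Spec_is_valid_path is_valid_path is_valid_path_alt
  rw [any_illegal_eq]
  by_cases h1 : path.toList.contains '<' = true <;>
  by_cases h2 : path.toList.contains '>' = true <;>
  by_cases h3 : path.toList.contains '"' = true <;>
  by_cases h4 : path.toList.contains '|' = true <;>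
  by_cases h5 : path.toList.contains '?' = true <;>
  by_cases h6 : path.toList.contains '*' = true <;>
  by_cases h7 : path.toList.length > 260 <;>
  simp_all
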